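-- pv_equiv track=rewrite | github.com/flowerdonk/TIL | algorythm/SWEA_4831.py | Bus
-- ===== SOURCE A (Python) =====
-- def Bus(KNM, M_list): # 최대 정류장 수, 종점, 충전기 # 충전기 정류장 번호 리스트
--     charge = 0 # 충전 횟수
--     position = 0 # 버스의 위치
--     K = KNM[0] # 이동 가능한 최대 정류장 수
--     N = KNM[1] # 종점 위치
--     M = KNM[2] # 충전기 정류장 수
--
--     while position < N: # 위치가 종점보다 작을 때
--         if position + K >= N: # 반복하다가 위치 + 이동 가능 수가 종점을 넘으면
--             return charge # 충전 횟수 그대로 리턴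
--
--         if position + K in M_list: # 위치 + 이동 가능 수가 충전기 정류장일 때
--             position += K # 이동 가능 최대수 만큼 이동
--             charge += 1 # 충전 횟수 +1
--             continue # 해당 반복 턴 종료
--         else:
--             check = 0 # 이동 여부
--             for i in range(K - 1, 0, -1): # 위치에 1부터 k - 1까지 더함
--                 if position + i in M_list:
--                     position += i
--                     charge += 1
--                     check += 1
--                     break
--             if check == 0: # 이동을 안했을 경우
--                 return 0 # 0 리턴
--
--     return charge
-- ===== SOURCE B (Python) =====
-- def Bus(KNM, M_list):
--     # One max-scan over the charger list per hop (largest charger reachable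
--     # from the current position) instead of A's offset countdown with a
--     # membership test per offset.
--     K, N = KNM[0], KNM[1]
--     _M = KNM[2]
--     charge = 0
--     position = 0
--     while position + K < N:
--         nxt = None
--         for s in M_list:
--             if position < s <= position + K and (nxt is None or s > nxt):
--                 nxt = s
--         if nxt is None:
--             return 0
--         position = nxt
--         charge += 1
--     return charge
-- ===== Notes on version B (the rewrite author's own statement) =====
-- stated objective: alternative
-- what changed: Per hop, A counts offsets K-1..1 downward and tests each offset for membership in M_list; B makes a single max-scan over M_list keeping the largest charger in (position, position+K], so the inner offset loop disappears.
-- outside the precondition, e.g. on Bus([0, 5, 0], []): A returns 0, B returns 0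
import Mathlib
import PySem

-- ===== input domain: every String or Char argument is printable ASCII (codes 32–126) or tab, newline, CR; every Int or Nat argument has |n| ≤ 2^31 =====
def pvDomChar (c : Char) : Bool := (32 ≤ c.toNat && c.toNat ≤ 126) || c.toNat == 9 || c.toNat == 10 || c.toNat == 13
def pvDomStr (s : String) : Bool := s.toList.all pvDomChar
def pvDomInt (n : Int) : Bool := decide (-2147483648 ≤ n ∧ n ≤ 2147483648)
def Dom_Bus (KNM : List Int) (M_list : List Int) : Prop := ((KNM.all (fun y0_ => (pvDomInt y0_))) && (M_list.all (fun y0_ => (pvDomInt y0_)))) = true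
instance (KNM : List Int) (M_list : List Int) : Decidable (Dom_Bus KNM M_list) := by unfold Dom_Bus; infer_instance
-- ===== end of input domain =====

-- B replaces A's per-hop offset countdown (each offset probed with a membership test)
-- by a single max-scan over the charger list per hop; same return value on Pre_.

-- ===== PORT A =====
-- A's while-loop; under Pre_Bus (K ≥ 1) the position strictly increases each
-- iteration, so fuel = N.toNat + 1 is never exhausted (the fuel-0 branch is unreachable).
def busALoop (K N : Int) (Ml : List Int) : Nat → Int → Int → Int
  | 0, charge, _ => charge
  | fuel+1, charge, position =>
    if position < N then
      if position + K ≥ N then charge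
      else if (position + K) ∈ Ml then
        busALoop K N Ml fuel (charge + 1) (position + K)
      else
        -- for i in range(K-1, 0, -1): first i with position+i in M_list
        match (PySem.List.pyRange (K - 1) 0 (-1)).find? (fun i => decide ((position + i) ∈ Ml)) with
        | some i => busALoop K N Ml fuel (charge + 1) (position + i)
        | none => 0
    else charge

def Bus (KNM : List Int) (M_list : List Int) : Int :=
  -- KNM[0], KNM[1], KNM[2]: IndexError (pyGet? = none) excluded by Pre_Bus
  let K := (PySem.List.pyGet? KNM 0).getD 0
  let N := (PySem.List.pyGet? KNM 1).getD 0
  let _M := (PySem.List.pyGet? KNM 2).getD 0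
  busALoop K N M_list (N.toNat + 1) 0 0

-- ===== PORT B =====
-- for s in M_list: keep the largest s with position < s <= position + K
def busBNext (Ml : List Int) (position K : Int) : Option Int :=
  Ml.foldl (fun nxt s =>
    if position < s ∧ s ≤ position + K ∧ (∀ v ∈ nxt, v < s) then some s else nxt) none

def busBLoop (K N : Int) (Ml : List Int) : Nat → Int → Int → Int
  | 0, charge, _ => charge
  | fuel+1, charge, position =>
    if position + K < N then
      match busBNext Ml position K with
      | none => 0
      | some nxt => busBLoop K N Ml fuel (charge + 1) nxt
    else charge

def Bus_alt (KNM : List Int) (M_list : List Int) : Int :=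
  let K := (PySem.List.pyGet? KNM 0).getD 0
  let N := (PySem.List.pyGet? KNM 1).getD 0
  let _M := (PySem.List.pyGet? KNM 2).getD 0
  busBLoop K N M_list (N.toNat + 1) 0 0

-- ===== PRECONDITION & SPEC =====
-- Pre_Bus: KNM must carry the three header values (else A raises IndexError), and
-- K ≥ 1 is the problem's natural domain: with K ≤ 0 the bus cannot advance — A then
-- returns 0 where it terminates but loops forever when the stuck position is a
-- charger (e.g. K = 0 with 0 in M_list), so K ≤ 0 is excluded as degenerate.
def Pre_Bus (KNM : List Int) (M_list : List Int) : Prop :=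
  3 ≤ KNM.length ∧ 1 ≤ (PySem.List.pyGet? KNM 0).getD 0
instance (KNM : List Int) (M_list : List Int) : Decidable (Pre_Bus KNM M_list) := by
  unfold Pre_Bus; infer_instance

def pvWitness_Bus : List Int × List Int := ([3, 10, 4], [3, 5, 7, 9])

def Spec_Bus (KNM : List Int) (M_list : List Int) (out : Int) : Prop := out = Bus_alt KNM M_list
instance (KNM : List Int) (M_list : List Int) (out : Int) : Decidable (Spec_Bus KNM M_list out) := by unfold Spec_Bus; infer_instance

-- ===== CLAIM (what is proved, stated in full; the proofs are below) =====
def Claim_equal_Bus : Prop := ∀ (KNM : List Int) (M_list : List Int), Dom_Bus KNM M_list → Pre_Bus KNM M_list → Spec_Bus KNM M_list (Bus KNM M_list)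

-- ===== LEMMAS AND PROOFS =====

-- the window predicate: s is a charger reachable from `position` in one hop
def winP (position K : Int) : Int → Bool := fun s => decide (position < s ∧ s ≤ position + K)

-- B's accumulator fold computes the running max of the window elements
lemma busBNext_go (position K : Int) (l : List Int) :
    ∀ acc : Option Int,
      l.foldl (fun nxt s =>
        if position < s ∧ s ≤ position + K ∧ (∀ v ∈ nxt, v < s) then some s else nxt) acc
      = (match acc, l.filter (winP position K) with
         | none, [] => none
         | none, x :: xs => some (xs.foldl max x)
         | some a, fp => some (fp.foldl max a)) := by
  have hfnone : ∀ x : Int,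
      (if position < x ∧ x ≤ position + K ∧ (∀ v ∈ (none : Option Int), v < x) then some x
       else (none : Option Int))
      = if winP position K x then some x else none := by
    intro x
    by_cases hx1 : position < x <;> by_cases hx2 : x ≤ position + K <;>
      simp [winP, hx1, hx2]
  have hfsome : ∀ (a x : Int),
      (if position < x ∧ x ≤ position + K ∧ (∀ v ∈ (some a : Option Int), v < x) then some x
       else (some a : Option Int))
      = if winP position K x then some (max a x) else some a := by
    intro a x
    by_cases hx1 : position < x <;> by_cases hx2 : x ≤ position + K
    · by_cases hlt : a < x
      · simp [winP, hx1, hx2, hlt, max_eq_right (le_of_lt hlt)]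
      · simp [winP, hx1, hx2, hlt, max_eq_left (le_of_not_gt hlt)]
    · simp [winP, hx1, hx2]
    · simp [winP, hx1, hx2]
    · simp [winP, hx1, hx2]
  induction l with
  | nil => intro acc; cases acc <;> simp
  | cons s t ih =>
    intro acc
    simp only [List.foldl_cons, List.filter_cons]
    cases acc with
    | none =>
      simp only [hfnone s]
      by_cases hw : winP position K s
      · rw [if_pos hw, if_pos hw, ih (some s)]
      · rw [if_neg hw, if_neg hw, ih none]
    | some a =>
      simp only [hfsome a s]
      by_cases hw : winP position K s
      · rw [if_pos hw, if_pos hw, ih (some (max a s))]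
        simp only [List.foldl_cons]
      · rw [if_neg hw, if_neg hw, ih (some a)]

-- the window max as List.max?
lemma busBNext_eq_max? (Ml : List Int) (position K : Int) :
    busBNext Ml position K = (Ml.filter (winP position K)).max? := by
  unfold busBNext
  rw [busBNext_go]
  cases h : Ml.filter (winP position K) with
  | nil => simp
  | cons x xs => simp [List.max?]

lemma max?_eq_some_of (l : List Int) (v : Int) (hmem : v ∈ l) (hmax : ∀ s ∈ l, s ≤ v) :
    l.max? = some v :=
  List.max?_eq_some_iff.mpr ⟨hmem, hmax⟩

-- A's countdown find? computes the window max for window (position, position+n]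
lemma aFind_eq_max? (Ml : List Int) (position : Int) (n : Nat) :
    (((PySem.List.pyRange (n : Int) 0 (-1)).find? (fun i => decide ((position + i) ∈ Ml))).map
      (fun i => position + i))
    = (Ml.filter (winP position (n : Int))).max? := by
  induction n with
  | zero =>
    rw [PySem.List.pyRange_neg_one_eq_nil (by norm_num)]
    have hnil : Ml.filter (winP position 0) = [] := by
      apply List.filter_eq_nil_iff.mpr
      intro s _
      simp only [winP, Bool.not_eq_true]
      apply decide_eq_false
      omega
    simp only [Nat.cast_zero]
    rw [hnil]
    rfl
  | succ n ih =>
    rw [show ((n + 1 : Nat) : Int) = (n : Int) + 1 by push_cast; ring]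
    rw [PySem.List.pyRange_neg_one_cons (by positivity)]
    rw [show (n : Int) + 1 - 1 = (n : Int) by ring]
    by_cases hmem : (position + ((n : Int) + 1)) ∈ Ml
    · rw [List.find?_cons_of_pos (by simpa using hmem)]
      simp only [Option.map_some]
      symm
      apply max?_eq_some_of
      · rw [List.mem_filter]
        refine ⟨hmem, ?_⟩
        simp only [winP]
        apply decide_eq_true
        omega
      · intro s hs
        rw [List.mem_filter] at hs
        have h2 := of_decide_eq_true hs.2
        simp only [winP] at h2
        omega
    · rw [List.find?_cons_of_neg (by simpa using hmem)]
      rw [ih]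
      congr 1
      apply List.filter_congr
      intro s hsm
      simp only [winP, decide_eq_decide]
      constructor
      · rintro ⟨h1, h2⟩; exact ⟨h1, by omega⟩
      · rintro ⟨h1, h2⟩
        refine ⟨h1, ?_⟩
        rcases lt_or_eq_of_le h2 with h | h
        · omega
        · exfalso; apply hmem; rw [show position + ((n : Int) + 1) = s by omega]; exact hsm

-- A's full per-hop step equals the window max (K ≥ 1)
lemma aStep_eq_max? (Ml : List Int) (position K : Int) (hK : 1 ≤ K) :
    (if (position + K) ∈ Ml then some (position + K)
     else ((PySem.List.pyRange (K - 1) 0 (-1)).find? (fun i => decide ((position + i) ∈ Ml))).map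
       (fun i => position + i))
    = (Ml.filter (winP position K)).max? := by
  by_cases hmem : (position + K) ∈ Ml
  · rw [if_pos hmem]
    symm
    apply max?_eq_some_of
    · rw [List.mem_filter]; exact ⟨hmem, by simp [winP]; omega⟩
    · intro s hs; rw [List.mem_filter] at hs; simp [winP] at hs; omega
  · rw [if_neg hmem]
    have hcast : K - 1 = (((K - 1).toNat : Nat) : Int) := by omega
    rw [hcast, aFind_eq_max?]
    congr 1
    apply List.filter_congr
    intro s hsm
    simp only [winP, decide_eq_decide]
    constructor
    · rintro ⟨h1, h2⟩; exact ⟨h1, by omega⟩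
    · rintro ⟨h1, h2⟩
      refine ⟨h1, ?_⟩
      rcases lt_or_eq_of_le h2 with h | h
      · omega
      · exfalso; apply hmem; rw [show position + K = s by omega]; exact hsm

-- the two loops agree for every fuel, charge and position once K ≥ 1
lemma loops_eq (K N : Int) (Ml : List Int) (hK : 1 ≤ K) :
    ∀ (fuel : Nat) (charge position : Int),
      busALoop K N Ml fuel charge position = busBLoop K N Ml fuel charge position := by
  intro fuel
  induction fuel with
  | zero => intro charge position; rfl
  | succ fuel ih =>
    intro charge position
    rw [busALoop, busBLoop]
    by_cases hgo : position + K < N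
    · rw [if_pos hgo, if_pos (by omega), if_neg (by omega)]
      have hstep := aStep_eq_max? Ml position K hK
      rw [← busBNext_eq_max?] at hstep
      by_cases hmem : (position + K) ∈ Ml
      · rw [if_pos hmem] at hstep ⊢
        rw [← hstep]
        exact ih _ _
      · rw [if_neg hmem] at hstep ⊢
        cases hfind : (PySem.List.pyRange (K - 1) 0 (-1)).find? (fun i => decide ((position + i) ∈ Ml)) with
        | none => rw [hfind] at hstep; simp at hstep; rw [← hstep]
        | some i =>
          rw [hfind] at hstep; simp at hstep; rw [← hstep]
          exact ih _ _
    · rw [if_neg hgo]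
      by_cases hpos : position < N
      · rw [if_pos hpos, if_pos (by omega)]
      · rw [if_neg hpos]

-- ===== VERDICT (by name: the statement is the Claim_ definition above) =====
theorem Bus_spec : Claim_equal_Bus := by
  intro KNM M_list _hdom hpre
  unfold Spec_Bus Bus Bus_alt
  exact loops_eq _ _ _ hpre.2 _ _ _
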